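-- pv_equiv track=rewrite | github.com/AlessandroLongo23/02289-Algorithmic-Techniques-for-Modern-Data-Models | mod_3_streaming/mod_3_1_misra_gries/lib/misra_gries.py | merge_streams
-- ===== SOURCE A (Python) =====
-- def merge_streams(a: dict[int | str, int], b: dict[int | str, int], k: int) -> dict[int | str, int]:
--     merged_counters = a.copy()
--     for el in b:
--         if el in a:
--             merged_counters[el] += b[el]
--         else:
--             merged_counters[el] = b[el]
--
--     if len(merged_counters) > k - 1:
--         c = sorted(merged_counters.values(), reverse=True)[k - 1]
--         for el in merged_counters:
--             merged_counters[el] -= c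
--         merged_counters = {key: value for key, value in merged_counters.items() if value > 0}
--     return merged_counters
-- ===== SOURCE B (Python) =====
-- def merge_streams(a: dict[int | str, int], b: dict[int | str, int], k: int) -> dict[int | str, int]:
--     merged = dict(a)
--     for key, vb in b.items():
--         merged[key] = merged.get(key, 0) + vb
--     m = len(merged)
--     if m <= k - 1:
--         return merged
--     # threshold c = k-th largest value = (m-k)-th smallest, by quickselect
--     c = _select(list(merged.values()), m - k)
--     return {key: v - c for key, v in merged.items() if v > c}
--
--
-- def _select(vals, i):
--     # i-th smallest element of vals (0-based), quickselect with middle pivot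
--     p = vals[len(vals) // 2]
--     lows = [v for v in vals if v < p]
--     if i < len(lows):
--         return _select(lows, i)
--     highs = [v for v in vals if v > p]
--     if i < len(vals) - len(highs):
--         return p
--     return _select(highs, i - (len(vals) - len(highs)))
-- ===== Notes on version B (the rewrite author's own statement) =====
-- stated objective: alternative
-- what changed: The merge becomes a single get-based accumulation pass over b.items() and the pruning a single dict comprehension, and the threshold (the k-th largest value) is found by a hand-written quickselect (middle pivot, expected O(m)) instead of fully sorting all values descending and indexing.
-- outside the precondition, e.g. on merge_streams({'x': 3, 'y': 1}, {}, 0): A returns {'x': 2}, B raises IndexError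
import Mathlib
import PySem

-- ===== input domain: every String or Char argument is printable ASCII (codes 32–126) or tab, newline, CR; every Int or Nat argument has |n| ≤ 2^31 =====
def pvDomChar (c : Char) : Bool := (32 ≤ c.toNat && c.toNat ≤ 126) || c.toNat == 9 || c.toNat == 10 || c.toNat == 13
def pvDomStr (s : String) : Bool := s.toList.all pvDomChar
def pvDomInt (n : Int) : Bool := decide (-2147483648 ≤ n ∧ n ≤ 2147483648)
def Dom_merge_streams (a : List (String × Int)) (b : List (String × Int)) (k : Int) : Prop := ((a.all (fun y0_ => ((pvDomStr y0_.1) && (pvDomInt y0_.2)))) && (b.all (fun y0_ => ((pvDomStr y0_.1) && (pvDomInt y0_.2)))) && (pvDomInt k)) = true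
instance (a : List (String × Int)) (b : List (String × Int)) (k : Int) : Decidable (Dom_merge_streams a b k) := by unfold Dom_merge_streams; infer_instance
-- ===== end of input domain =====

-- B merges with one get-based accumulation pass and finds the k-th largest value by quickselect
-- (middle pivot) instead of fully sorting the values descending; pruning is a single filter+map.

-- ===== PORT A =====
def merge_streams (a : List (String × Int)) (b : List (String × Int)) (k : Int) : List (String × Int) :=
  let da := PySem.Dict.ofList a
  let db := PySem.Dict.ofList b
  -- merged_counters = a.copy(); for el in b: ...
  let merged := db.keys.foldl (fun m el =>
      if da.contains el then m.insert el (m.getD el 0 + db.getD el 0)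
      else m.insert el (db.getD el 0)) da
  if (k - 1 : Int) < (merged.size : Int) then
    -- c = sorted(merged_counters.values(), reverse=True)[k - 1]; valid index under Pre_ (getD 0 unreached on none = IndexError)
    let c := (PySem.List.pyGet? (PySem.List.sorted merged.values (fun x => x) true) (k - 1)).getD 0
    -- for el in merged_counters: merged_counters[el] -= c
    let m2 := merged.keys.foldl (fun m el => m.insert el (m.getD el 0 - c)) merged
    -- {key: value for key, value in merged_counters.items() if value > 0}: keys already unique,
    -- so the comprehension's items are exactly the filtered items
    m2.items.filter (fun p => decide (0 < p.2))
  else merged.items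

-- ===== PORT B =====
-- helper lemma needed by pvSelect's termination proof
theorem pvLenFilterLt {α : Type} {q : α → Bool} {l : List α} {x : α} (hx : x ∈ l) (hq : q x = false) :
    (l.filter q).length < l.length :=
  List.length_filter_lt_length_iff_exists.mpr ⟨x, hx, by simp [hq]⟩

-- p = vals[len(vals) // 2]
def pvMid (vals : List Int) : Int := (PySem.List.pyGet? vals ((vals.length : Int) / 2)).getD 0

theorem pvMid_mem (vals : List Int) (hv : vals ≠ []) : pvMid vals ∈ vals := by
  have hlen : 0 < vals.length := List.length_pos_iff.mpr hv
  have h0 : (0 : Int) ≤ (vals.length : Int) / 2 := by omega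
  have h1 : (vals.length : Int) / 2 < (vals.length : Int) := by omega
  rw [pvMid, PySem.List.pyGet?_eq_some_getElem _ h0 h1, Option.getD_some]
  exact List.getElem_mem _

-- def _select(vals, i): i-th smallest by quickselect (vals[len//2] on [] = IndexError, unreached under Pre_)
def pvSelect (vals : List Int) (i : Int) : Int :=
  if hv : vals = [] then 0
  else
    let p := pvMid vals
    let lows := vals.filter (fun v => decide (v < p))
    if i < (lows.length : Int) then pvSelect lows i
    else
      let highs := vals.filter (fun v => decide (p < v))
      if i < (vals.length : Int) - (highs.length : Int) then p
      else pvSelect highs (i - ((vals.length : Int) - (highs.length : Int)))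
termination_by vals.length
decreasing_by
  · simpa using pvLenFilterLt (l := vals.attach) (q := fun x => decide (x.1 < pvMid vals))
      (List.mem_attach vals ⟨pvMid vals, pvMid_mem vals hv⟩) (by simp)
  · simpa using pvLenFilterLt (l := vals.attach) (q := fun x => decide (pvMid vals < x.1))
      (List.mem_attach vals ⟨pvMid vals, pvMid_mem vals hv⟩) (by simp)

def merge_streams_alt (a : List (String × Int)) (b : List (String × Int)) (k : Int) : List (String × Int) :=
  let merged0 := PySem.Dict.ofList a
  let db := PySem.Dict.ofList b
  -- for key, vb in b.items(): merged[key] = merged.get(key, 0) + vb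
  let merged := db.items.foldl (fun m p => m.insert p.1 (m.getD p.1 0 + p.2)) merged0
  if (merged.size : Int) ≤ k - 1 then merged.items
  else
    let c := pvSelect merged.values ((merged.size : Int) - k)
    -- {key: v - c for key, v in merged.items() if v > c}: keys unique, items = filtered mapped list
    (merged.items.filter (fun p => decide (c < p.2))).map (fun p => (p.1, p.2 - c))

-- ===== PRECONDITION & SPEC =====
-- Pre_ excludes k ≤ 0: there A's sorted(...)[k - 1] index is negative, so A either raises
-- IndexError (when k < 1 - len(merged)) or returns a value picked by Python's negative-index
-- wraparound, while B's quickselect raises IndexError on every such input.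
def Pre_merge_streams (a : List (String × Int)) (b : List (String × Int)) (k : Int) : Prop := 1 ≤ k
instance (a : List (String × Int)) (b : List (String × Int)) (k : Int) : Decidable (Pre_merge_streams a b k) := by unfold Pre_merge_streams; infer_instance

def pvWitness_merge_streams : (List (String × Int)) × (List (String × Int)) × Int :=
  ([("a", 3), ("b", 1)], [("b", 2), ("c", 1)], 2)

def Spec_merge_streams (a : List (String × Int)) (b : List (String × Int)) (k : Int) (out : List (String × Int)) : Prop := out = merge_streams_alt a b k
instance (a : List (String × Int)) (b : List (String × Int)) (k : Int) (out : List (String × Int)) : Decidable (Spec_merge_streams a b k out) := by unfold Spec_merge_streams; infer_instance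

-- ===== CLAIM (what is proved, stated in full; the proofs are below) =====
def Claim_equal_merge_streams : Prop := ∀ (a : List (String × Int)) (b : List (String × Int)) (k : Int), Dom_merge_streams a b k → Pre_merge_streams a b k → Spec_merge_streams a b k (merge_streams a b k)

-- ===== LEMMAS AND PROOFS =====

-- the ascending sort decomposes around any pivot p into (sorted lows) ++ equals ++ (sorted highs)
theorem pvSortedSplit (vals : List Int) (p : Int) :
    PySem.List.sorted vals (fun x => x) false
      = PySem.List.sorted (vals.filter (fun v => decide (v < p))) (fun x => x) false
        ++ vals.filter (fun v => decide (v = p))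
        ++ PySem.List.sorted (vals.filter (fun v => decide (p < v))) (fun x => x) false := by
  apply PySem.List.sorted_id_eq_of_perm_of_pairwise
  · -- permutation
    have hL := PySem.List.sorted_perm (vals.filter (fun v => decide (v < p))) (fun x => x) false
    have hH := PySem.List.sorted_perm (vals.filter (fun v => decide (p < v))) (fun x => x) false
    have h2 := List.filter_append_perm (fun v => decide (v = p)) (vals.filter (fun v => !decide (v < p)))
    rw [List.filter_filter, List.filter_filter] at h2
    have e1 : vals.filter (fun a => decide (a = p) && !decide (a < p)) = vals.filter (fun v => decide (v = p)) := by
      apply List.filter_congr; intro x _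
      by_cases h : x = p <;> simp [h]
    have e2 : vals.filter (fun a => !decide (a = p) && !decide (a < p)) = vals.filter (fun v => decide (p < v)) := by
      apply List.filter_congr; intro x _
      rcases lt_trichotomy x p with h | h | h <;> simp [h] <;> omega
    rw [e1, e2] at h2
    have hMH : (vals.filter (fun v => decide (v = p))
          ++ PySem.List.sorted (vals.filter (fun v => decide (p < v))) (fun x => x) false).Perm
        (vals.filter (fun v => !decide (v < p))) :=
      ((List.Perm.refl _).append hH).trans h2
    rw [List.append_assoc]
    exact (hL.append hMH).trans (List.filter_append_perm _ vals)
  · -- pairwise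
    rw [List.append_assoc, List.pairwise_append]
    refine ⟨PySem.List.sorted_pairwise _ _, ?_, ?_⟩
    · rw [List.pairwise_append]
      refine ⟨?_, PySem.List.sorted_pairwise _ _, ?_⟩
      · apply List.pairwise_of_forall_mem_list
        intro x hx y hy
        have hx' := (List.mem_filter.mp hx).2
        have hy' := (List.mem_filter.mp hy).2
        simp at hx' hy'; omega
      · intro x hx y hy
        have hx' := (List.mem_filter.mp hx).2
        have hy' := (List.mem_filter.mp ((PySem.List.mem_sorted _ _ _ _).mp hy)).2
        simp at hx' hy'; omega
    · intro x hx y hy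
      have hx' := (List.mem_filter.mp ((PySem.List.mem_sorted _ _ _ _).mp hx)).2
      rcases List.mem_append.mp hy with hy | hy
      · have hy' := (List.mem_filter.mp hy).2
        simp at hx' hy'; omega
      · have hy' := (List.mem_filter.mp ((PySem.List.mem_sorted _ _ _ _).mp hy)).2
        simp at hx' hy'; omega

-- quickselect returns the i-th element of the ascending sort
theorem pvSelect_spec : ∀ (n : Nat) (vals : List Int), vals.length ≤ n → ∀ (i : Int), 0 ≤ i → i < (vals.length : Int) →
    (PySem.List.sorted vals (fun x => x) false)[i.toNat]? = some (pvSelect vals i) := by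
  intro n
  induction n with
  | zero =>
    intro vals h i h0 h1
    have : (vals.length : Int) = 0 := by omega
    omega
  | succ n ih =>
    intro vals hlen i h0 h1
    have hv : vals ≠ [] := by
      intro h; subst h; simp at h1; omega
    rw [pvSelect]
    rw [dif_neg hv]
    set p := pvMid vals with hp
    have hpmem := pvMid_mem vals hv
    set lows := vals.filter (fun v => decide (v < p)) with hlows
    set mids := vals.filter (fun v => decide (v = p)) with hmids
    set highs := vals.filter (fun v => decide (p < v)) with hhighs
    have hsplit := pvSortedSplit vals p
    rw [← hlows, ← hmids, ← hhighs] at hsplit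
    have hlenL : (PySem.List.sorted lows (fun x => x) false).length = lows.length :=
      PySem.List.length_sorted _ _ _
    have hlenH : (PySem.List.sorted highs (fun x => x) false).length = highs.length :=
      PySem.List.length_sorted _ _ _
    have hsum : lows.length + mids.length + highs.length = vals.length := by
      have h := congrArg List.length hsplit
      simp only [List.length_append, hlenL, hlenH, PySem.List.length_sorted] at h
      omega
    have hlowlt : lows.length < vals.length := pvLenFilterLt hpmem (by simp [hp])
    have hhighlt : highs.length < vals.length := pvLenFilterLt hpmem (by simp [hp])
    by_cases hc1 : i < (lows.length : Int)
    · rw [if_pos hc1]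
      have hrec := ih lows (by omega) i h0 hc1
      rw [hsplit, List.getElem?_append_left, List.getElem?_append_left]
      · exact hrec
      · rw [hlenL]; omega
      · rw [List.length_append, hlenL]; omega
    · rw [if_neg hc1]
      by_cases hc2 : i < (vals.length : Int) - (highs.length : Int)
      · rw [if_pos hc2]
        have hiM : i.toNat - lows.length < mids.length := by omega
        rw [hsplit]
        rw [List.getElem?_append_left (by rw [List.length_append, hlenL]; omega)]
        rw [List.getElem?_append_right (by rw [hlenL]; omega)]
        rw [hlenL]
        rw [List.getElem?_eq_getElem hiM]
        have hmem : mids[i.toNat - lows.length]'hiM ∈ mids := List.getElem_mem _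
        have : mids[i.toNat - lows.length]'hiM = p := by
          have hmem' : mids[i.toNat - lows.length]'hiM ∈ List.filter (fun v => decide (v = p)) vals := by
            rw [← hmids]; exact hmem
          have := (List.mem_filter.mp hmem').2
          simpa using this
        rw [this]
      · rw [if_neg hc2]
        have h0' : 0 ≤ i - ((vals.length : Int) - (highs.length : Int)) := by omega
        have h1' : i - ((vals.length : Int) - (highs.length : Int)) < (highs.length : Int) := by omega
        have hrec := ih highs (by omega) _ h0' h1'
        rw [hsplit]
        rw [List.getElem?_append_right (by rw [List.length_append, hlenL]; omega)]
        rw [List.length_append, hlenL]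
        have hidx : i.toNat - (lows.length + mids.length)
            = (i - ((vals.length : Int) - (highs.length : Int))).toNat := by omega
        rw [hidx]
        exact hrec

theorem pvSortedRevEqReverse (vals : List Int) :
    PySem.List.sorted vals (fun x => x) true = (PySem.List.sorted vals (fun x => x) false).reverse := by
  apply List.eq_of_perm_of_sorted (le := fun a b : Int => b ≤ a)
  · intro a b _ _ h1 h2; omega
  · exact PySem.List.sorted_pairwise_rev vals (fun x => x)
  · rw [List.pairwise_reverse]
    exact PySem.List.sorted_pairwise vals (fun x => x)
  · exact ((PySem.List.sorted_perm vals (fun x => x) true).trans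
      (PySem.List.sorted_perm vals (fun x => x) false).symm).trans (List.reverse_perm _).symm

-- A's threshold (k-th largest, by descending sort) = B's threshold (quickselect for the (m-k)-th smallest)
theorem pvThresholdEq (vs : List Int) (k : Int) (hk : 1 ≤ k) (hlt : k - 1 < (vs.length : Int)) :
    (PySem.List.pyGet? (PySem.List.sorted vs (fun x => x) true) (k - 1)).getD 0
      = pvSelect vs ((vs.length : Int) - k) := by
  have h0 : 0 ≤ k - 1 := by omega
  have hlen : ((PySem.List.sorted vs (fun x => x) false).reverse.length : Int) = (vs.length : Int) := by
    rw [List.length_reverse, PySem.List.length_sorted]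
  rw [pvSortedRevEqReverse]
  rw [PySem.List.pyGet?_eq_some_getElem _ h0 (by omega), Option.getD_some]
  have hspec := pvSelect_spec vs.length vs le_rfl ((vs.length : Int) - k) (by omega) (by omega)
  have hlt' : ((vs.length : Int) - k).toNat < (PySem.List.sorted vs (fun x => x) false).length := by
    rw [PySem.List.length_sorted]; omega
  rw [List.getElem?_eq_getElem hlt'] at hspec
  have hidx : (PySem.List.sorted vs (fun x => x) false).length - 1 - (k - 1).toNat
      = ((vs.length : Int) - k).toNat := by
    rw [PySem.List.length_sorted]; omega
  rw [List.getElem_reverse]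
  simp only [hidx]
  exact Option.some.inj hspec

-- A's merge loop over b's keys equals B's accumulation loop over b's items
theorem pvMergeFoldEq (da db : PySem.Dict String Int) :
    ∀ (l : List (String × Int)) (m : PySem.Dict String Int),
    (l.map Prod.fst).Nodup →
    (∀ p ∈ l, db.getD p.1 0 = p.2) →
    (∀ p ∈ l, da.contains p.1 = false → m.contains p.1 = false) →
    l.foldl (fun m p => m.insert p.1 (m.getD p.1 0 + p.2)) m
      = (l.map Prod.fst).foldl (fun m el =>
          if da.contains el then m.insert el (m.getD el 0 + db.getD el 0)
          else m.insert el (db.getD el 0)) m := by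
  intro l
  induction l with
  | nil => intro m _ _ _; rfl
  | cons p t ih =>
    intro m hnd hdb hinv
    simp only [List.map_cons, List.foldl_cons]
    have hd : db.getD p.1 0 = p.2 := hdb p (List.mem_cons_self)
    have hstep : (if da.contains p.1 then m.insert p.1 (m.getD p.1 0 + db.getD p.1 0)
        else m.insert p.1 (db.getD p.1 0)) = m.insert p.1 (m.getD p.1 0 + p.2) := by
      by_cases hc : da.contains p.1 = true
      · rw [if_pos hc, hd]
      · have hc' : da.contains p.1 = false := by simpa using hc
        rw [if_neg (by simp [hc']), hd,
          PySem.Dict.getD_of_not_contains m 0 (hinv p (List.mem_cons_self) hc'), zero_add]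
    rw [hstep]
    have hnd' := (List.nodup_cons.mp hnd).2
    have hp1 : p.1 ∉ t.map Prod.fst := (List.nodup_cons.mp hnd).1
    apply ih _ hnd' (fun q hq => hdb q (List.mem_cons_of_mem _ hq))
    intro q hq hda
    rw [PySem.Dict.contains_insert]
    have hne : q.1 ≠ p.1 := by
      intro h; exact hp1 (h ▸ List.mem_map_of_mem hq)
    simp [hne, hinv q (List.mem_cons_of_mem _ hq) hda]

-- subtracting c from every key in place rewrites the items pointwise
theorem pvSubFoldItems (c : Int) :
    ∀ (l : List String) (d : PySem.Dict String Int), d.keys.Nodup → l.Nodup → (∀ x ∈ l, x ∈ d.keys) →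
    (l.foldl (fun m el => m.insert el (m.getD el 0 - c)) d).items
      = d.items.map (fun p => if p.1 ∈ l then (p.1, p.2 - c) else p) := by
  intro l
  induction l with
  | nil => intro d _ _ _; simp
  | cons x t ih =>
    intro d hnd hl hmem
    simp only [List.foldl_cons]
    have hc : d.contains x = true := (PySem.Dict.contains_iff_mem_keys d x).mpr (hmem x List.mem_cons_self)
    have hkeys' : (d.insert x (d.getD x 0 - c)).keys = d.keys := PySem.Dict.keys_insert_of_contains d _ hc
    have hnd' : (d.insert x (d.getD x 0 - c)).keys.Nodup := by rw [hkeys']; exact hnd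
    have hitems' : (d.insert x (d.getD x 0 - c)).items
        = d.items.map (fun p => if p.1 = x then (p.1, p.2 - c) else p) := by
      rw [PySem.Dict.items_insert_of_contains d _ hc]
      apply List.map_congr_left
      intro p hp
      by_cases hpx : p.1 = x
      · have hmemit : (x, p.2) ∈ d.items := by
          have : p = (p.1, p.2) := rfl
          rw [← hpx]; simpa using hp
        have hget : d.getD x 0 = p.2 := PySem.Dict.getD_of_mem_items d hmemit hnd 0
        simp [hpx, hget]
      · simp [hpx]
    rw [ih _ hnd' (List.Nodup.of_cons hl)
      (fun y hy => by rw [hkeys']; exact hmem y (List.mem_cons_of_mem _ hy))]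
    rw [hitems', List.map_map]
    apply List.map_congr_left
    intro p hp
    have hxt : x ∉ t := (List.nodup_cons.mp hl).1
    by_cases hpx : p.1 = x
    · simp [Function.comp, hpx, hxt]
    · by_cases hpt : p.1 ∈ t <;> simp [Function.comp, hpx, hpt]

theorem pvPruneEq (d : PySem.Dict String Int) (hnd : d.keys.Nodup) (c : Int) :
    ((d.keys.foldl (fun m el => m.insert el (m.getD el 0 - c)) d).items.filter (fun p => decide (0 < p.2)))
      = (d.items.filter (fun p => decide (c < p.2))).map (fun p => (p.1, p.2 - c)) := by
  rw [pvSubFoldItems c d.keys d hnd hnd (fun x h => h)]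
  have hm : d.items.map (fun p => if p.1 ∈ d.keys then (p.1, p.2 - c) else p)
      = d.items.map (fun p => (p.1, p.2 - c)) := by
    apply List.map_congr_left
    intro p hp
    have : p.1 ∈ d.keys := List.mem_map_of_mem hp
    simp [this]
  rw [hm, List.filter_map]
  congr 1
  apply List.filter_congr
  intro p _
  simp only [Function.comp]
  rw [decide_eq_decide]
  omega

-- ===== VERDICT (by name: the statement is the Claim_ definition above) =====
theorem merge_streams_spec : Claim_equal_merge_streams := by
  intro a b k _ hPre
  have hk : (1 : Int) ≤ k := hPre
  unfold Spec_merge_streams merge_streams merge_streams_alt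
  dsimp only
  have hkeysb : (PySem.Dict.ofList b).keys = (PySem.Dict.ofList b).items.map Prod.fst := rfl
  have hmerge : (PySem.Dict.ofList b).items.foldl
        (fun m p => m.insert p.1 (m.getD p.1 0 + p.2)) (PySem.Dict.ofList a)
      = (PySem.Dict.ofList b).keys.foldl (fun m el =>
          if (PySem.Dict.ofList a).contains el
          then m.insert el (m.getD el 0 + (PySem.Dict.ofList b).getD el 0)
          else m.insert el ((PySem.Dict.ofList b).getD el 0)) (PySem.Dict.ofList a) := by
    rw [hkeysb]
    exact pvMergeFoldEq (PySem.Dict.ofList a) (PySem.Dict.ofList b) (PySem.Dict.ofList b).items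
      (PySem.Dict.ofList a)
      (by rw [← hkeysb]; exact PySem.Dict.nodup_keys_ofList b)
      (fun p hp => PySem.Dict.getD_of_mem_items _ (by simpa using hp) (PySem.Dict.nodup_keys_ofList b) 0)
      (fun p _ h => h)
  rw [← hmerge]
  set d := (PySem.Dict.ofList b).items.foldl
      (fun m p => m.insert p.1 (m.getD p.1 0 + p.2)) (PySem.Dict.ofList a) with hd
  have hnd : d.keys.Nodup :=
    PySem.Dict.nodup_keys_foldl_insert_key (PySem.Dict.ofList b).items Prod.fst
      (fun m p => m.getD p.1 0 + p.2) (PySem.Dict.ofList a) (PySem.Dict.nodup_keys_ofList a)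
  have hvlen : d.values.length = d.size := List.length_map ..
  by_cases hcond : (d.size : Int) ≤ k - 1
  · rw [if_neg (by omega), if_pos hcond]
  · rw [if_pos (by omega), if_neg hcond]
    have hth := pvThresholdEq d.values k hk (by omega)
    rw [hth]
    have hlen' : ((d.values.length : Int) - k) = ((d.size : Int) - k) := by
      rw [hvlen]
    rw [hlen']
    exact pvPruneEq d hnd _
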